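-- pv_equiv track=rewrite | github.com/vollgerlab/asm-smk | workflow/scripts/orient_contigs.py | determine_orientation
-- ===== SOURCE A (Python) =====
-- def determine_orientation(alignments):
--     """
--     For each contig, determine primary chromosome and orientation.
--
--     Returns dict: contig -> (primary_chrom, should_flip, total_bases)
--     """
--     orientations = {}
--
--     for contig, chrom_data in alignments.items():
--         # Find chromosome with most total aligned bases
--         chrom_totals = {}
--         for chrom, strand_data in chrom_data.items():
--             chrom_totals[chrom] = strand_data["+"] + strand_data["-"]
--
--         if not chrom_totals:
--             continue
--
--         primary_chrom = max(chrom_totals, key=chrom_totals.get)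
--         total_bases = chrom_totals[primary_chrom]
--
--         # Determine strand orientation for primary chromosome
--         fwd_bases = chrom_data[primary_chrom]["+"]
--         rev_bases = chrom_data[primary_chrom]["-"]
--
--         # Flip if majority of bases are on reverse strand
--         should_flip = rev_bases > fwd_bases
--
--         orientations[contig] = (primary_chrom, should_flip, total_bases, fwd_bases, rev_bases)
--
--     return orientations
-- ===== SOURCE B (Python) =====
-- def determine_orientation(alignments):
--     """
--     For each contig, determine primary chromosome and orientation.
--
--     Single pass per contig: keep a running best (chrom, total, fwd, rev)
--     instead of building a totals dict, calling max, and re-looking up.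
--     Strictly-greater updates reproduce max's first-occurrence tie-break.
--     """
--     orientations = {}
--     for contig, chrom_data in alignments.items():
--         best = None
--         for chrom, strand_data in chrom_data.items():
--             fwd = strand_data["+"]
--             rev = strand_data["-"]
--             total = fwd + rev
--             if best is None or total > best[1]:
--                 best = (chrom, total, fwd, rev)
--         if best is not None:
--             chrom, total, fwd, rev = best
--             orientations[contig] = (chrom, rev > fwd, total, fwd, rev)
--     return orientations
-- ===== Notes on version B (the rewrite author's own statement) =====
-- stated objective: simpler
-- what changed: Per contig, one pass over chrom_data keeping a running best (chrom, total, fwd, rev) with strict '>' updates replaces building a chrom_totals dict, calling max(key=...) over it, and re-looking up the primary chromosome's strand counts.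
import Mathlib
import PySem

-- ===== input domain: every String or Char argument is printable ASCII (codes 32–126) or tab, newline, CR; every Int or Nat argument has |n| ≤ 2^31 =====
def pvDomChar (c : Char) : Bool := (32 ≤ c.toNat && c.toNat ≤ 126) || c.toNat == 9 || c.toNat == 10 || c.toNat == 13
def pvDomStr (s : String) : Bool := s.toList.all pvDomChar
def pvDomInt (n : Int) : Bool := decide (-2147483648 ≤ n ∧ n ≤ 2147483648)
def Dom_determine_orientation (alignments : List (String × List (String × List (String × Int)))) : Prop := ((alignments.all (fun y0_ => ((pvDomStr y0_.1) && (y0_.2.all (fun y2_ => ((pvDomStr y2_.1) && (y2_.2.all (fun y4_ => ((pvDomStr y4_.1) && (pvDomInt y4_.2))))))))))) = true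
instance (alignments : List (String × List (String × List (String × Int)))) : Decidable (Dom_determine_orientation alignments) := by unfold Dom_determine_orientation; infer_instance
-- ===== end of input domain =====

-- B replaces A's per-contig totals dict + max(key=...) + re-lookup by one running-best pass; objective: simpler.


-- The Python argument is a dict of dicts of dicts; the assoc-list input is normalised to
-- PySem.Dict at every level exactly as Python's dict construction does (last value wins).
def pvDictOf (alignments : List (String × List (String × List (String × Int)))) :
    PySem.Dict String (PySem.Dict String (PySem.Dict String Int)) :=
  PySem.Dict.ofList (alignments.map (fun p => (p.1, PySem.Dict.ofList (p.2.map (fun q => (q.1, PySem.Dict.ofList q.2))))))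

-- ===== PORT A =====
-- strand_data["+"] / ["-"] are ported as getD under Pre_ (both keys present, so no KeyError);
-- chrom_data[primary_chrom] always succeeds (primary_chrom is one of its keys), getD's default is unreachable.
def determine_orientation (alignments : List (String × List (String × List (String × Int)))) : List (String × String × Bool × Int × Int × Int) :=
  ((pvDictOf alignments).items.foldl (fun orientations cp =>
      let contig := cp.1
      let chrom_data := cp.2
      let chrom_totals := chrom_data.items.foldl
          (fun t p => t.insert p.1 (p.2.getD "+" 0 + p.2.getD "-" 0)) PySem.Dict.empty
      if chrom_totals.items.isEmpty then orientations
      else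
        match PySem.List.max? chrom_totals.keys (fun k => chrom_totals.getD k 0) with
        | none => orientations   -- unreachable: chrom_totals is nonempty here
        | some primary_chrom =>
          let total_bases := chrom_totals.getD primary_chrom 0
          let fwd_bases := (chrom_data.getD primary_chrom PySem.Dict.empty).getD "+" 0
          let rev_bases := (chrom_data.getD primary_chrom PySem.Dict.empty).getD "-" 0
          let should_flip := rev_bases > fwd_bases
          orientations.insert contig (primary_chrom, should_flip, total_bases, fwd_bases, rev_bases))
    PySem.Dict.empty).items

-- ===== PORT B =====
def determine_orientation_alt (alignments : List (String × List (String × List (String × Int)))) : List (String × String × Bool × Int × Int × Int) :=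
  ((pvDictOf alignments).items.foldl (fun orientations cp =>
      let contig := cp.1
      let best := cp.2.items.foldl (fun best p =>
          let fwd := p.2.getD "+" 0
          let rev := p.2.getD "-" 0
          let total := fwd + rev
          match best with
          | none => some (p.1, total, fwd, rev)
          | some b => if total > b.2.1 then some (p.1, total, fwd, rev) else some b) none
      match best with
      | none => orientations
      | some b => orientations.insert contig (b.1, b.2.2.2 > b.2.2.1, b.2.1, b.2.2.1, b.2.2.2))
    PySem.Dict.empty).items

-- ===== PRECONDITION & SPEC =====
-- Pre_ excludes exactly the inputs where Python A raises KeyError: some strand dict that is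
-- actually reached (i.e. survives dict deduplication) lacks the "+" or the "-" key.
def Pre_determine_orientation (alignments : List (String × List (String × List (String × Int)))) : Prop :=
  ∀ cp ∈ (pvDictOf alignments).items, ∀ p ∈ cp.2.items,
    p.2.contains "+" = true ∧ p.2.contains "-" = true
instance (alignments : List (String × List (String × List (String × Int)))) : Decidable (Pre_determine_orientation alignments) := by unfold Pre_determine_orientation; infer_instance

def pvWitness_determine_orientation : (List (String × List (String × List (String × Int)))) :=
  [("ctg1", [("chr1", [("+", 5), ("-", 3)]), ("chr2", [("+", 1), ("-", 9)])]), ("ctg2", [])]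

def Spec_determine_orientation (alignments : List (String × List (String × List (String × Int)))) (out : List (String × String × Bool × Int × Int × Int)) : Prop := out = determine_orientation_alt alignments
instance (alignments : List (String × List (String × List (String × Int)))) (out : List (String × String × Bool × Int × Int × Int)) : Decidable (Spec_determine_orientation alignments out) := by unfold Spec_determine_orientation; infer_instance

-- ===== CLAIM (what is proved, stated in full; the proofs are below) =====
def Claim_equal_determine_orientation : Prop := ∀ (alignments : List (String × List (String × List (String × Int)))), Dom_determine_orientation alignments → Pre_determine_orientation alignments → Spec_determine_orientation alignments (determine_orientation alignments)

-- ===== LEMMAS AND PROOFS =====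

-- the per-strand total and the summary tuple B keeps of an item
def pvTot (sd : PySem.Dict String Int) : Int := sd.getD "+" 0 + sd.getD "-" 0
def pvG (p : String × PySem.Dict String Int) : String × Int × Int × Int :=
  (p.1, pvTot p.2, p.2.getD "+" 0, p.2.getD "-" 0)

-- max? commutes with a map when the two keys agree on the list's elements
lemma max?_foldl_map {α β : Type} (h : α → β) (k1 : β → Int) (k2 : α → Int) :
    ∀ (l : List α) (acc : Option α), (∀ p ∈ l, k1 (h p) = k2 p) → (∀ a, acc = some a → k1 (h a) = k2 a) →
      List.foldl (fun acc x => match acc with | none => some x | some m => if k1 m < k1 x then some x else some m)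
        (Option.map h acc) (l.map h)
      = Option.map h (List.foldl (fun acc x => match acc with | none => some x | some m => if k2 m < k2 x then some x else some m) acc l) := by
  intro l
  induction l with
  | nil => intro acc _ _; simp
  | cons p t ih =>
    intro acc hk hacc
    have hkp : k1 (h p) = k2 p := hk p (by simp)
    have hk' : ∀ q ∈ t, k1 (h q) = k2 q := fun q hq => hk q (by simp [hq])
    cases acc with
    | none => simpa using ih (some p) hk' (by intro a ha; cases ha; exact hkp)
    | some m =>
      have hkm := hacc m rfl
      simp only [List.map_cons, List.foldl_cons, Option.map_some, hkm, hkp]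
      by_cases hlt : k2 m < k2 p
      · simpa [hlt] using ih (some p) hk' (by intro a ha; cases ha; exact hkp)
      · simpa [hlt] using ih (some m) hk' (by intro a ha; cases ha; exact hkm)

lemma max?_map_congr {α β : Type} (l : List α) (h : α → β) (k1 : β → Int) (k2 : α → Int)
    (hk : ∀ p ∈ l, k1 (h p) = k2 p) :
    PySem.List.max? (l.map h) k1 = Option.map h (PySem.List.max? l k2) := by
  unfold PySem.List.max?
  simpa using max?_foldl_map h k1 k2 l none hk (by simp)

-- B's running-best fold is max? under the summary map pvG (proof-side step functions)
def pvBStep (best : Option (String × Int × Int × Int)) (p : String × PySem.Dict String Int) :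
    Option (String × Int × Int × Int) :=
  match best with
  | none => some (pvG p)
  | some b => if pvTot p.2 > b.2.1 then some (pvG p) else some b

def pvMStep (acc : Option (String × PySem.Dict String Int)) (x : String × PySem.Dict String Int) :
    Option (String × PySem.Dict String Int) :=
  match acc with
  | none => some x
  | some m => if pvTot m.2 < pvTot x.2 then some x else some m

lemma bfold_aux (l : List (String × PySem.Dict String Int)) :
    ∀ acc : Option (String × PySem.Dict String Int),
      l.foldl pvBStep (Option.map pvG acc) = Option.map pvG (l.foldl pvMStep acc) := by
  induction l with
  | nil => intro acc; simp
  | cons p t ih =>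
    intro acc
    cases acc with
    | none => simpa [pvBStep, pvMStep] using ih (some p)
    | some m =>
      by_cases hlt : pvTot m.2 < pvTot p.2
      · simpa [pvBStep, pvMStep, pvG, gt_iff_lt, hlt] using ih (some p)
      · simpa [pvBStep, pvMStep, pvG, gt_iff_lt, hlt] using ih (some m)

lemma bfold_eq (l : List (String × PySem.Dict String Int)) :
    l.foldl (fun best p =>
        let fwd := p.2.getD "+" 0
        let rev := p.2.getD "-" 0
        let total := fwd + rev
        match best with
        | none => some (p.1, total, fwd, rev)
        | some b => if total > b.2.1 then some (p.1, total, fwd, rev) else some b) none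
    = Option.map pvG (PySem.List.max? l (fun p => pvTot p.2)) := by
  have h1 : l.foldl (fun best p =>
        let fwd := p.2.getD "+" 0
        let rev := p.2.getD "-" 0
        let total := fwd + rev
        match best with
        | none => some (p.1, total, fwd, rev)
        | some b => if total > b.2.1 then some (p.1, total, fwd, rev) else some b) none
      = l.foldl pvBStep none := by
    apply PySem.List.foldl_congr_mem
    intro acc p _
    cases acc <;> simp [pvBStep, pvG, pvTot]
  have h2 : PySem.List.max? l (fun p => pvTot p.2) = l.foldl pvMStep none := by
    unfold PySem.List.max?
    apply PySem.List.foldl_congr_mem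
    intro acc x _
    cases acc <;> simp [pvMStep]
  rw [h1, h2]
  simpa using bfold_aux l none

-- every value of a dict built by a fold of inserts is an old value or one of the inserted ones
lemma values_foldl_insert {κ ν : Type} [BEq κ] [LawfulBEq κ]
    (l : List (κ × ν)) (d : PySem.Dict κ ν) (w : ν)
    (hw : w ∈ (l.foldl (fun acc p => acc.insert p.1 p.2) d).values) :
    w ∈ d.values ∨ w ∈ l.map (·.2) := by
  induction l generalizing d with
  | nil => simpa using hw
  | cons p t ih =>
    simp only [List.foldl_cons] at hw
    rcases ih (d.insert p.1 p.2) hw with h | h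
    · rcases PySem.Dict.mem_values_insert d p.1 p.2 w h with h | h
      · right; simp [h]
      · left; exact h
    · right; simp [h]

-- the single-contig bodies of A and B agree whenever chrom_data's keys are distinct
lemma contig_eq (cd : PySem.Dict String (PySem.Dict String Int)) (hnd : cd.keys.Nodup)
    (orientations : PySem.Dict String (String × Bool × Int × Int × Int)) (contig : String) :
    (let chrom_totals := cd.items.foldl
          (fun t p => t.insert p.1 (p.2.getD "+" 0 + p.2.getD "-" 0)) PySem.Dict.empty
      if chrom_totals.items.isEmpty then orientations
      else
        match PySem.List.max? chrom_totals.keys (fun k => chrom_totals.getD k 0) with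
        | none => orientations
        | some primary_chrom =>
          orientations.insert contig (primary_chrom,
            (cd.getD primary_chrom PySem.Dict.empty).getD "-" 0 > (cd.getD primary_chrom PySem.Dict.empty).getD "+" 0,
            chrom_totals.getD primary_chrom 0,
            (cd.getD primary_chrom PySem.Dict.empty).getD "+" 0,
            (cd.getD primary_chrom PySem.Dict.empty).getD "-" 0))
    = (match cd.items.foldl (fun best p =>
          let fwd := p.2.getD "+" 0
          let rev := p.2.getD "-" 0
          let total := fwd + rev
          match best with
          | none => some (p.1, total, fwd, rev)
          | some b => if total > b.2.1 then some (p.1, total, fwd, rev) else some b) none with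
        | none => orientations
        | some b => orientations.insert contig (b.1, b.2.2.2 > b.2.2.1, b.2.1, b.2.2.1, b.2.2.2)) := by
  have hitems : (cd.items.foldl
        (fun t p => t.insert p.1 (p.2.getD "+" 0 + p.2.getD "-" 0)) PySem.Dict.empty).items
      = List.map (fun p => (p.1, pvTot p.2)) cd.items := by
    have := PySem.Dict.items_foldl_insert_fresh (l := cd.items)
      (k := fun p => p.1) (v := fun p => pvTot p.2) (d := PySem.Dict.empty)
      (fun a _ => PySem.Dict.contains_empty a.1) hnd
    simpa [pvTot] using this
  set totals := cd.items.foldl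
      (fun t p => t.insert p.1 (p.2.getD "+" 0 + p.2.getD "-" 0)) PySem.Dict.empty with htotals
  have hkeys : totals.keys = cd.items.map (fun p => p.1) := by
    simp [PySem.Dict.keys, hitems]
  have hndt : totals.keys.Nodup := by rw [hkeys]; exact hnd
  have hgetD : ∀ p ∈ cd.items, totals.getD p.1 0 = pvTot p.2 := by
    intro p hp
    exact PySem.Dict.getD_of_mem_items totals (by rw [hitems]; exact List.mem_map_of_mem hp) hndt 0
  have hmax : PySem.List.max? totals.keys (fun k => totals.getD k 0)
      = Option.map (fun p => p.1) (PySem.List.max? cd.items (fun p => pvTot p.2)) := by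
    rw [hkeys]
    exact max?_map_congr cd.items (fun p => p.1) (fun k => totals.getD k 0) (fun p => pvTot p.2) hgetD
  by_cases hcd : cd.items = []
  · simp [hitems, hcd]
  · have hne : totals.items.isEmpty = false := by
      simp [hitems, hcd]
    rcases hm : PySem.List.max? cd.items (fun p => pvTot p.2) with _ | m
    · rw [PySem.List.max?_eq_none_iff] at hm; exact absurd hm hcd
    · have hmem : m ∈ cd.items := PySem.List.max?_mem hm
      have hmv : cd.getD m.1 PySem.Dict.empty = m.2 :=
        PySem.Dict.getD_of_mem_items cd (by simpa using hmem) hnd PySem.Dict.empty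
      rw [bfold_eq]
      simp only [hne, Bool.false_eq_true, if_false, hmax, hm, Option.map_some]
      rw [hgetD m hmem, hmv]
      simp [pvG, pvTot]

-- ===== VERDICT (by name: the statement is the Claim_ definition above) =====
theorem determine_orientation_spec : Claim_equal_determine_orientation := by
  intro alignments _ _
  unfold Spec_determine_orientation determine_orientation determine_orientation_alt
  have hvals : ∀ cp ∈ (pvDictOf alignments).items, cp.2.keys.Nodup := by
    intro cp hcp
    have hv : cp.2 ∈ (pvDictOf alignments).values := by
      simp only [PySem.Dict.values]
      exact List.mem_map_of_mem hcp
    have := values_foldl_insert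
      (alignments.map (fun p => (p.1, PySem.Dict.ofList (p.2.map (fun q => (q.1, PySem.Dict.ofList q.2)))))) PySem.Dict.empty cp.2
      (by simpa [pvDictOf, PySem.Dict.ofList, PySem.Dict.update] using hv)
    rcases this with h | h
    · simp [PySem.Dict.values, PySem.Dict.empty] at h
    · simp only [List.map_map, List.mem_map] at h
      obtain ⟨a, _, ha⟩ := h
      rw [← ha]
      exact PySem.Dict.nodup_keys_ofList _
  congr 1
  apply PySem.List.foldl_congr_mem
  intro acc cp hcp
  simpa using contig_eq cp.2 (hvals cp hcp) acc cp.1
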